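-- pv_equiv track=rewrite | github.com/wkid-neu/GHP-FPGA-CNN | Python/ana/cwm_opt.py | _conv_params_alignment
-- ===== SOURCE A (Python) =====
-- def _conv_params_alignment(OC, INC, KH, KW, M, S) -> tuple:  # aligned_OC, aligned_INC
--     """Parameters aligment for Conv."""
--     # OC must be multiple of 2M
--     if OC%(M*2) != 0:
--         aligned_OC = (OC//(M*2)+1)*(M*2)
--     else:
--         aligned_OC = OC
--     # INC must be multiple of S
--     # Vector size must be a multiple of 8
--     # Vector size must be larger than M.
--     aligned_INC = INC
--     while (aligned_INC*KH*KW < M) or ((aligned_INC*KH*KW)%8 != 0) or (aligned_INC%S != 0):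
--         aligned_INC += 1
--     return aligned_OC, aligned_INC
-- ===== SOURCE B (Python) =====
-- def _gcd(a, b):
--     while b:
--         a, b = b, a % b
--     return a
--
-- def _conv_params_alignment(OC, INC, KH, KW, M, S) -> tuple:  # aligned_OC, aligned_INC
--     """Parameters alignment for Conv, via a closed form instead of a unit-step search."""
--     two_m = M * 2
--     aligned_OC = OC if OC % two_m == 0 else (OC // two_m + 1) * two_m
--     K = KH * KW
--     # aligned_INC*K % 8 == 0  <=>  step | aligned_INC
--     step = 8 // _gcd(8, K)
--     # aligned_INC % S == 0    <=>  |S| | aligned_INC ; both together <=> lcm | aligned_INC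
--     s = abs(S)
--     lcm = s * step // _gcd(s, step)
--     # aligned_INC*K >= M      <=>  aligned_INC >= ceil(M / K)   (K > 0)
--     lo = max(INC, -(-M // K))
--     aligned_INC = -(-lo // lcm) * lcm
--     return aligned_OC, aligned_INC
-- ===== Notes on version B (the rewrite author's own statement) =====
-- stated objective: faster
-- what changed: Replaces the unit-step while-loop search for aligned_INC by a closed form: the valid values are exactly the multiples of lcm(|S|, 8//gcd(8,KH*KW)) that are >= ceil(M/(KH*KW)), so B rounds max(INC, ceil(M/K)) up to the next such multiple directly.
-- outside the precondition, e.g. on _conv_params_alignment(-17, -15, -4, 1, -10, 3): A returns (-20, -12), B returns (-20, 6); on _conv_params_alignment(12, 3, 0, 4, -9, 1): A returns (0, 3), B raises ZeroDivisionError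
import Mathlib
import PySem

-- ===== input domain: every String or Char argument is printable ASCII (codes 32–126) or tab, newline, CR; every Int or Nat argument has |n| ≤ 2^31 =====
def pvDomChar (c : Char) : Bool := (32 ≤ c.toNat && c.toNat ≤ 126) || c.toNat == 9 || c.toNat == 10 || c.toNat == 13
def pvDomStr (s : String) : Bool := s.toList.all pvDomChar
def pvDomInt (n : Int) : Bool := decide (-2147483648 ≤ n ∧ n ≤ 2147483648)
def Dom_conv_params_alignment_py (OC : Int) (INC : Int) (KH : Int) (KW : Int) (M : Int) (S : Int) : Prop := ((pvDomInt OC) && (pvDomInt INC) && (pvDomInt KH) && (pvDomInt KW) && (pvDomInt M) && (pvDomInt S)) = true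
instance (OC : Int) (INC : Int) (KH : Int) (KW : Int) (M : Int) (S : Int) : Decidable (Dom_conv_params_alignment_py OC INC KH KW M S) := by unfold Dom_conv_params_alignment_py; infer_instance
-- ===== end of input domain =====

-- B replaces A's unit-step search for aligned_INC by a closed form (round up to the next
-- valid multiple of lcm(|S|, 8//gcd(8,KH*KW))): objective = faster (asymptotic).

-- ===== PORT A =====
-- A's while loop, step for step; the constant fuel only makes the recursion total
-- (it is proved sufficient on Dom ∩ Pre_, where the Python loop terminates).
def convLoopA (KH KW M S : Int) : Nat → Int → Int
  | 0, x => x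
  | fuel+1, x =>
    if x*KH*KW < M ∨ PySem.Int.mod (x*KH*KW) 8 ≠ 0 ∨ PySem.Int.mod x S ≠ 0
    then convLoopA KH KW M S fuel (x+1) else x

def conv_params_alignment_py (OC : Int) (INC : Int) (KH : Int) (KW : Int) (M : Int) (S : Int) : List Int :=
  let aligned_OC := if PySem.Int.mod OC (M*2) ≠ 0 then (PySem.Int.floordiv OC (M*2) + 1) * (M*2) else OC
  let aligned_INC := convLoopA KH KW M S 1099511627776 INC
  [aligned_OC, aligned_INC]

-- ===== PORT B =====
-- Source B's hand-written Euclid gcd (`while b: a, b = b, a % b`), with Python's `%`.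
def pyGcdB (a b : Int) : Int :=
  if h : b = 0 then a else pyGcdB b (PySem.Int.mod a b)
termination_by b.natAbs
decreasing_by
  rcases lt_or_gt_of_ne h with hb | hb
  · have h1 := (PySem.Int.mod_neg_bounds a hb).1
    have h2 := (PySem.Int.mod_neg_bounds a hb).2
    omega
  · have h1 := PySem.Int.mod_nonneg a hb
    have h2 := PySem.Int.mod_lt a hb
    omega

def conv_params_alignment_py_alt (OC : Int) (INC : Int) (KH : Int) (KW : Int) (M : Int) (S : Int) : List Int :=
  let two_m := M * 2
  let aligned_OC := if PySem.Int.mod OC two_m = 0 then OC else (PySem.Int.floordiv OC two_m + 1) * two_m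
  let K := KH * KW
  let step := PySem.Int.floordiv 8 (pyGcdB 8 K)
  let s := |S|
  let lcm := PySem.Int.floordiv (s * step) (pyGcdB s step)
  let lo := max INC (-(PySem.Int.floordiv (-M) K))
  let aligned_INC := -(PySem.Int.floordiv (-lo) lcm) * lcm
  [aligned_OC, aligned_INC]

-- ===== PRECONDITION & SPEC =====
-- Pre_ excludes M = 0 and S = 0, where A raises ZeroDivisionError (or loops forever),
-- and non-positive kernel area KH*KW ≤ 0, outside the natural conv domain, where A's
-- unit-step search diverges on most inputs and the value it returns when it happens to
-- stop is accidental (B's closed form does not apply there).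
def Pre_conv_params_alignment_py (OC : Int) (INC : Int) (KH : Int) (KW : Int) (M : Int) (S : Int) : Prop :=
  M ≠ 0 ∧ S ≠ 0 ∧ 0 < KH * KW
instance (OC : Int) (INC : Int) (KH : Int) (KW : Int) (M : Int) (S : Int) : Decidable (Pre_conv_params_alignment_py OC INC KH KW M S) := by unfold Pre_conv_params_alignment_py; infer_instance

def pvWitness_conv_params_alignment_py : Int × Int × Int × Int × Int × Int := (16, 3, 3, 3, 32, 4)

def Spec_conv_params_alignment_py (OC : Int) (INC : Int) (KH : Int) (KW : Int) (M : Int) (S : Int) (out : List Int) : Prop := out = conv_params_alignment_py_alt OC INC KH KW M S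
instance (OC : Int) (INC : Int) (KH : Int) (KW : Int) (M : Int) (S : Int) (out : List Int) : Decidable (Spec_conv_params_alignment_py OC INC KH KW M S out) := by unfold Spec_conv_params_alignment_py; infer_instance

-- ===== CLAIM (what is proved, stated in full; the proofs are below) =====
def Claim_equal_conv_params_alignment_py : Prop := ∀ (OC : Int) (INC : Int) (KH : Int) (KW : Int) (M : Int) (S : Int), Dom_conv_params_alignment_py OC INC KH KW M S → Pre_conv_params_alignment_py OC INC KH KW M S → Spec_conv_params_alignment_py OC INC KH KW M S (conv_params_alignment_py OC INC KH KW M S)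

-- ===== LEMMAS AND PROOFS =====

theorem pyGcdB_eq_gcd_aux (n : Nat) : ∀ (a b : Int), 0 ≤ a → 0 ≤ b → b.natAbs ≤ n → pyGcdB a b = Int.gcd a b := by
  induction n with
  | zero =>
    intro a b ha hb hn
    have hb0 : b = 0 := by omega
    rw [pyGcdB, dif_pos hb0, hb0]
    simp [Int.natAbs_of_nonneg ha]
  | succ n ih =>
    intro a b ha hb hn
    rw [pyGcdB]
    split
    · next h => rw [h]; simp [Int.natAbs_of_nonneg ha]
    · next h =>
      have hbpos : 0 < b := lt_of_le_of_ne hb (Ne.symm h)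
      rw [PySem.Int.mod_eq_emod_of_pos (a := a) hbpos]
      have h1 : 0 ≤ a % b := Int.emod_nonneg a (by omega)
      have h2 : a % b < b := Int.emod_lt_of_pos a hbpos
      rw [ih b (a % b) hb h1 (by omega)]
      rw [Int.gcd_comm, Int.gcd_emod]

theorem pyGcdB_eq_gcd (a b : Int) (ha : 0 ≤ a) (hb : 0 ≤ b) : pyGcdB a b = Int.gcd a b :=
  pyGcdB_eq_gcd_aux b.natAbs a b ha hb le_rfl

theorem dvd_eight_mul_iff (k : Nat) (x : Nat) :
    8 ∣ x * k ↔ (8 / Nat.gcd 8 k) ∣ x := by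
  have hgpos : 0 < Nat.gcd 8 k := Nat.gcd_pos_of_pos_left k (by norm_num)
  set g := Nat.gcd 8 k with hg
  set e := 8 / g with he
  set k' := k / g with hk'
  have h8 : g * e = 8 := Nat.mul_div_cancel' (Nat.gcd_dvd_left 8 k)
  have hkk : g * k' = k := Nat.mul_div_cancel' (Nat.gcd_dvd_right 8 k)
  have hco : Nat.Coprime e k' := Nat.coprime_div_gcd_div_gcd hgpos
  constructor
  · intro h
    have hx : x * k = g * (x * k') := by rw [← hkk]; ring
    have h2 : g * e ∣ g * (x * k') := by rw [h8, ← hx]; exact h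
    have h3 : e ∣ x * k' := (mul_dvd_mul_iff_left (by omega : g ≠ 0)).mp h2
    exact hco.dvd_of_dvd_mul_right h3
  · intro h
    obtain ⟨t, ht⟩ := h
    exact ⟨t * k', by rw [ht, ← h8, ← hkk]; ring⟩

theorem ceil_le_iff (M K x : Int) (hK : 0 < K) : M ≤ x * K ↔ -((-M) / K) ≤ x := by
  have h := Int.ediv_add_emod (-M) K
  have hr0 := Int.emod_nonneg (-M) (by omega : K ≠ 0)
  have hrK := Int.emod_lt_of_pos (-M) hK
  set q := (-M) / K with hq
  set r := (-M) % K with hr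
  constructor
  · intro h1
    by_contra h2
    push_neg at h2
    have hx : x ≤ -q - 1 := by omega
    have := mul_le_mul_of_nonneg_right hx hK.le
    nlinarith
  · intro h1
    have := mul_le_mul_of_nonneg_right h1 hK.le
    nlinarith

theorem roundup_spec (lo L : Int) (hL : 0 < L) :
    L ∣ (-((-lo) / L) * L) ∧ lo ≤ -((-lo) / L) * L ∧ -((-lo) / L) * L < lo + L ∧
    ∀ y, L ∣ y → lo ≤ y → -((-lo) / L) * L ≤ y := by
  have h := Int.ediv_add_emod (-lo) L
  have hr0 := Int.emod_nonneg (-lo) (by omega : L ≠ 0)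
  have hrL := Int.emod_lt_of_pos (-lo) hL
  set q := (-lo) / L with hq
  set r := (-lo) % L with hr
  have hN : -q * L = lo + r := by linarith [h]
  refine ⟨dvd_mul_left L (-q), by omega, by omega, ?_⟩
  rintro y ⟨t, ht⟩ hy
  have h1 : L * (-q - 1) < L * t := by nlinarith
  have h2 : -q - 1 < t := lt_of_mul_lt_mul_left h1 hL.le
  have h3 : -q ≤ t := by omega
  have h4 := mul_le_mul_of_nonneg_left h3 hL.le
  rw [ht, mul_comm]
  exact h4

theorem convLoopA_first (KH KW M S : Int) (N : Int) :
    ∀ (fuel : Nat) (x : Int), x ≤ N →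
    ¬ (N*KH*KW < M ∨ PySem.Int.mod (N*KH*KW) 8 ≠ 0 ∨ PySem.Int.mod N S ≠ 0) →
    (∀ y, x ≤ y → y < N → (y*KH*KW < M ∨ PySem.Int.mod (y*KH*KW) 8 ≠ 0 ∨ PySem.Int.mod y S ≠ 0)) →
    (N - x).toNat ≤ fuel → convLoopA KH KW M S fuel x = N := by
  intro fuel
  induction fuel with
  | zero => intro x hxN _ _ hf; simp [convLoopA]; omega
  | succ n ih =>
    intro x hxN hN hlt hf
    by_cases hx : x = N
    · subst hx; simp only [convLoopA, if_neg hN]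
    · have hxN' : x < N := lt_of_le_of_ne hxN hx
      have hc := hlt x le_rfl hxN'
      simp only [convLoopA, if_pos hc]
      exact ih (x+1) (by omega) hN (fun y h1 h2 => hlt y (by omega) h2) (by omega)

theorem aligned_INC_eq (INC KH KW M S : Int)
    (hINC : -2147483648 ≤ INC ∧ INC ≤ 2147483648)
    (hMb : -2147483648 ≤ M ∧ M ≤ 2147483648)
    (hSb : -2147483648 ≤ S ∧ S ≤ 2147483648)
    (hM : M ≠ 0) (hS : S ≠ 0) (hK : 0 < KH * KW) :
    convLoopA KH KW M S 1099511627776 INC =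
      -(PySem.Int.floordiv
          (-(max INC (-(PySem.Int.floordiv (-M) (KH*KW)))))
          (PySem.Int.floordiv (|S| * PySem.Int.floordiv 8 (pyGcdB 8 (KH*KW)))
            (pyGcdB |S| (PySem.Int.floordiv 8 (pyGcdB 8 (KH*KW))))))
        * (PySem.Int.floordiv (|S| * PySem.Int.floordiv 8 (pyGcdB 8 (KH*KW)))
            (pyGcdB |S| (PySem.Int.floordiv 8 (pyGcdB 8 (KH*KW))))) := by
  set K := KH * KW with hKdef
  -- step = 8 // gcd(8, K)
  have hg1 : pyGcdB 8 K = ((Nat.gcd 8 K.natAbs : Nat) : Int) := by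
    rw [pyGcdB_eq_gcd 8 K (by norm_num) hK.le]; simp [Int.gcd]
  have hg1pos : 0 < Nat.gcd 8 K.natAbs := Nat.gcd_pos_of_pos_left _ (by norm_num)
  have hstpos : 0 < 8 / Nat.gcd 8 K.natAbs :=
    Nat.div_pos (Nat.le_of_dvd (by norm_num) (Nat.gcd_dvd_left 8 K.natAbs)) hg1pos
  have hstep : PySem.Int.floordiv 8 (pyGcdB 8 K) = ((8 / Nat.gcd 8 K.natAbs : Nat) : Int) := by
    rw [hg1, PySem.Int.floordiv_eq_ediv_of_pos (by exact_mod_cast hg1pos)]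
    exact_mod_cast (Int.natCast_ediv 8 (Nat.gcd 8 K.natAbs)).symm
  set st := 8 / Nat.gcd 8 K.natAbs with hstdef
  -- lcm = |S| * st // gcd(|S|, st)
  have hsN : ((S.natAbs : Nat) : Int) = |S| := (Int.abs_eq_natAbs S).symm
  have hsNpos : 0 < S.natAbs := Int.natAbs_pos.mpr hS
  have hg2 : pyGcdB |S| (st : Int) = ((Nat.gcd S.natAbs st : Nat) : Int) := by
    rw [pyGcdB_eq_gcd _ _ (by positivity) (by positivity)]
    simp [Int.gcd, Int.natAbs_abs]
  have hg2pos : 0 < Nat.gcd S.natAbs st := Nat.gcd_pos_of_pos_left _ hsNpos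
  have hlcm : PySem.Int.floordiv (|S| * (st:Int)) (pyGcdB |S| (st:Int)) = ((Nat.lcm S.natAbs st : Nat) : Int) := by
    rw [hg2, PySem.Int.floordiv_eq_ediv_of_pos (by exact_mod_cast hg2pos)]
    have h1 : ((S.natAbs * st / (S.natAbs.gcd st) : Nat) : Int)
        = ((S.natAbs * st : Nat) : Int) / ((S.natAbs.gcd st : Nat) : Int) := Int.natCast_ediv _ _
    rw [Nat.cast_mul, hsN] at h1
    rw [← h1]
    exact_mod_cast rfl
  set L := Nat.lcm S.natAbs st with hLdef
  have hLposN : 0 < L := Nat.lcm_pos hsNpos hstpos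
  have hLpos : (0:Int) < (L:Int) := by exact_mod_cast hLposN
  rw [hstep, hlcm]
  -- the ceiling threshold
  have hcK : PySem.Int.floordiv (-M) K = (-M) / K := PySem.Int.floordiv_eq_ediv_of_pos (b := K) hK
  rw [hcK]
  set c := -((-M) / K) with hcdef
  set lo := max INC c with hlodef
  rw [PySem.Int.floordiv_eq_ediv_of_pos (b := (L:Int)) hLpos]
  set N := -(-lo / (L:Int)) * (L:Int) with hNdef
  -- characterise the loop's stopping condition
  have hvalid : ∀ y : Int,
      ¬ (y*KH*KW < M ∨ PySem.Int.mod (y*KH*KW) 8 ≠ 0 ∨ PySem.Int.mod y S ≠ 0) ↔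
      ((L:Int) ∣ y ∧ c ≤ y) := by
    intro y
    have hyK : y * KH * KW = y * K := by rw [hKdef, mul_assoc]
    have h8 : PySem.Int.mod (y*K) 8 = 0 ↔ ((st:Int) ∣ y) := by
      rw [PySem.Int.mod_eq_zero_iff_dvd]
      rw [show (8:Int) = ((8:Nat):Int) by norm_cast, Int.ofNat_dvd_left, Int.natAbs_mul,
        dvd_eight_mul_iff, ← Int.ofNat_dvd_left]
    have hSd : PySem.Int.mod y S = 0 ↔ ((S.natAbs : Nat) : Int) ∣ y := by
      rw [PySem.Int.mod_eq_zero_iff_dvd, Int.natAbs_dvd]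
    have hLd : ((L:Int) ∣ y) ↔ (((S.natAbs : Nat) : Int) ∣ y ∧ ((st:Int) ∣ y)) := by
      rw [Int.ofNat_dvd_left, Int.ofNat_dvd_left, Int.ofNat_dvd_left, hLdef, Nat.lcm_dvd_iff]
    have hceil := ceil_le_iff M K y hK
    rw [hyK, not_or, not_or, not_lt, not_ne_iff, not_ne_iff, h8, hSd, hceil, hLd]
    rw [hcdef]
    tauto
  -- the round-up facts
  obtain ⟨hdvd, hle, hltN, hmin⟩ := roundup_spec lo (L:Int) hLpos
  rw [← hNdef] at hdvd hle hltN hmin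
  -- bounds for the fuel
  have hcb : c ≤ max M 0 := by
    have h1 : M ≤ (max M 0) * K := by
      rcases (by omega : 0 ≤ M ∨ M < 0) with h | h
      · have : max M 0 = M := max_eq_left h
        rw [this]
        nlinarith
      · have : max M 0 = 0 := max_eq_right h.le
        rw [this]; nlinarith
    have := (ceil_le_iff M K (max M 0) hK).mp h1
    omega
  have hLb : (L:Int) ≤ ((S.natAbs : Nat) : Int) * 8 := by
    have h1 : L ≤ S.natAbs * st := Nat.le_of_dvd (by positivity)
      (Nat.lcm_dvd (dvd_mul_right _ _) (dvd_mul_left _ _))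
    have h2 : st ≤ 8 := Nat.div_le_self 8 _
    have : L ≤ S.natAbs * 8 := le_trans h1 (Nat.mul_le_mul_left _ h2)
    exact_mod_cast this
  have hsb : ((S.natAbs : Nat) : Int) ≤ 2147483648 := by rw [hsN]; rw [abs_le]; omega
  -- apply the first-hit lemma
  apply convLoopA_first
  · exact le_trans (le_max_left _ _) hle
  · rw [hvalid N]
    exact ⟨hdvd, le_trans (le_max_right INC c) hle⟩
  · intro y h1 h2
    by_contra hcon
    rw [hvalid y] at hcon
    have hyc : lo ≤ y := max_le (by omega) hcon.2
    have := hmin y hcon.1 hyc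
    omega
  · have hlo1 : lo ≤ 2147483648 := max_le (by omega) (by omega)
    omega

-- ===== VERDICT (by name: the statement is the Claim_ definition above) =====
theorem conv_params_alignment_py_spec : Claim_equal_conv_params_alignment_py := by
  intro OC INC KH KW M S hdom hpre
  obtain ⟨hM, hS, hK⟩ := hpre
  simp only [Dom_conv_params_alignment_py, pvDomInt, Bool.and_eq_true, decide_eq_true_eq] at hdom
  obtain ⟨⟨⟨⟨⟨hOCb, hINCb⟩, hKHb⟩, hKWb⟩, hMb⟩, hSb⟩ := hdom
  unfold Spec_conv_params_alignment_py conv_params_alignment_py conv_params_alignment_py_alt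
  dsimp only
  rw [aligned_INC_eq INC KH KW M S hINCb hMb hSb hM hS hK]
  by_cases hOC : PySem.Int.mod OC (M*2) = 0 <;> simp [hOC]
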